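-- pv_equiv track=rewrite | github.com/isma178/foobar | doomsday/solution.py | get_specs
-- ===== SOURCE A (Python) =====
-- def get_specs(matrix):
--     d = [sum(x) for x in matrix]                    # denominators
--     pos = [(x, y) for x, y in enumerate(d)]         # make immutable position object
--
--     t = [x for x in pos if x[1] != 0]               # transient states
--     s = [x for x in pos if x[1] == 0]               # absorbing states
--
--     order = [x[0] for x in t] + [x[0] for x in s]   # ordering for row and columns
--     dlist = [x[1] for x in t] + [x[1] for x in s]   # ordered denom list
--     return order, dlist
-- ===== SOURCE B (Python) =====
-- def get_specs(matrix):
--     d = [sum(row) for row in matrix]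
--     order = sorted(range(len(d)), key=lambda i: d[i] == 0)
--     dlist = [d[i] for i in order]
--     return order, dlist
-- ===== Notes on version B (the rewrite author's own statement) =====
-- stated objective: idiomatic
-- what changed: Replaces the enumerate-pair construction and two filter passes over the (index, sum) pairs by one stable boolean-keyed index sort (absorbing states keyed True sort last) followed by a single projection for the denominators.
import Mathlib
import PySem

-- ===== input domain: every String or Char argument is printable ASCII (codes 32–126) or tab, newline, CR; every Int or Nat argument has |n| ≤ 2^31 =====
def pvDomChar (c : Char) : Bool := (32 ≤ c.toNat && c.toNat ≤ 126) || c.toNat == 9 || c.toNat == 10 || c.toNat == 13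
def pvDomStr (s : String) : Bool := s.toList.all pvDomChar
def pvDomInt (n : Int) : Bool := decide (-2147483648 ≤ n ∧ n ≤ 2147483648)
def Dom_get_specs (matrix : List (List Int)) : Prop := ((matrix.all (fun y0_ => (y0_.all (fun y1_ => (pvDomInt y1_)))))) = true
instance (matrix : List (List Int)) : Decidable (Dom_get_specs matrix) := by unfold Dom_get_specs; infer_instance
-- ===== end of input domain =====

-- B replaces A's two filter passes over (index, sum) pairs by one stable boolean-keyed
-- index sort plus a projection (idiomatic; same cost, not claimed faster).

-- ===== PORT A =====
def get_specs (matrix : List (List Int)) : List Int × List Int :=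
  let d := matrix.map (fun x => x.sum)
  let pos := PySem.List.enumerate d 0
  let t := pos.filter (fun x => x.2 != 0)
  let s := pos.filter (fun x => x.2 == 0)
  let order := t.map (fun x => x.1) ++ s.map (fun x => x.1)
  let dlist := t.map (fun x => x.2) ++ s.map (fun x => x.2)
  (order, dlist)

-- ===== PORT B =====
def get_specs_alt (matrix : List (List Int)) : List Int × List Int :=
  let d := matrix.map (fun row => row.sum)
  let order := PySem.List.sorted (PySem.List.pyRange 0 (d.length : Int) 1)
                 (fun i => PySem.List.pyGetD d i 0 == 0)
  let dlist := order.map (fun i => PySem.List.pyGetD d i 0)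
  (order, dlist)

-- ===== PRECONDITION & SPEC =====
def Spec_get_specs (matrix : List (List Int)) (out : List Int × List Int) : Prop := out = get_specs_alt matrix
instance (matrix : List (List Int)) (out : List Int × List Int) : Decidable (Spec_get_specs matrix out) := by unfold Spec_get_specs; infer_instance

-- ===== CLAIM (what is proved, stated in full; the proofs are below) =====
def Claim_equal_get_specs : Prop := ∀ (matrix : List (List Int)), Dom_get_specs matrix → Spec_get_specs matrix (get_specs matrix)

-- ===== LEMMAS AND PROOFS =====

-- inserting x into a block list: past everything it does not go before, before everything it does
theorem insertBy_partition {α : Type} (before : α → α → Bool) (x : α) (F T : List α)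
    (hF : ∀ y ∈ F, before x y = false) (hT : ∀ y ∈ T, before x y = true) :
    PySem.List.insertBy before x (F ++ T) = F ++ x :: T := by
  induction F with
  | nil =>
      cases T with
      | nil => simp [PySem.List.insertBy]
      | cons t T' => simp [PySem.List.insertBy, hT t (by simp)]
  | cons f F' ih =>
      have hf : before x f = false := hF f (by simp)
      simp only [List.cons_append, PySem.List.insertBy, hf, Bool.false_eq_true, if_false]
      exact congrArg (f :: ·) (ih (fun y hy => hF y (by simp [hy])))

-- a stable sort by a Bool key is exactly the partition: false-keyed elements first, in order
theorem sorted_bool_key {α : Type} (xs : List α) (key : α → Bool) :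
    PySem.List.sorted xs key = xs.filter (fun x => !key x) ++ xs.filter key := by
  rw [PySem.List.sorted_eq_foldl_insertBy]
  induction xs using List.reverseRecOn with
  | nil => simp
  | append_singleton xs x ih =>
      rw [List.foldl_append, List.foldl_cons, List.foldl_nil, ih]
      cases h : key x with
      | false =>
          rw [insertBy_partition]
          · simp [List.filter_append, h]
          · intro y hy
            have := (List.mem_filter.mp hy).2
            simp only [Bool.not_eq_eq_eq_not, Bool.not_true] at this
            simp [h, this]
          · intro y hy
            have := (List.mem_filter.mp hy).2
            simp [h, this]
      | true =>
          rw [PySem.List.insertBy_of_forall_not_before]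
          · simp [List.filter_append, h]
          · intro y hy
            cases hk : key y <;> simp [h]

-- a pyGetD on a cons at a positive index steps into the tail
theorem pyGetD_cons_succ (a : Int) (d : List Int) (k : Int) (hk : 0 ≤ k) :
    PySem.List.pyGetD (a :: d) (k + 1) 0 = PySem.List.pyGetD d k 0 := by
  lift k to ℕ using hk
  have : (k : Int) + 1 = ((k + 1 : ℕ) : Int) := by push_cast; ring
  rw [this, PySem.List.pyGetD_natCast, PySem.List.pyGetD_natCast]
  simp

-- filtering enumerate(d, s) on the value equals filtering the index range and re-pairing
theorem filter_enumerate_eq (d : List Int) (p : Int → Bool) :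
    ∀ s : Int, (PySem.List.enumerate d s).filter (fun x => p x.2) =
      ((PySem.List.pyRange s (s + (d.length : Int)) 1).filter
          (fun i => p (PySem.List.pyGetD d (i - s) 0))).map
        (fun i => (i, PySem.List.pyGetD d (i - s) 0)) := by
  induction d with
  | nil =>
      intro s
      simp [PySem.List.enumerate_nil, PySem.List.pyRange_one_eq_nil (le_refl s)]
  | cons a d ih =>
      intro s
      have hcons : PySem.List.pyRange s (s + ((a :: d).length : Int)) 1 =
          s :: PySem.List.pyRange (s + 1) ((s + 1) + (d.length : Int)) 1 := by
        have h2 : s + (((a :: d).length : Int)) = (s + 1) + (d.length : Int) := by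
          push_cast [List.length_cons]; ring
        rw [h2, PySem.List.pyRange_one_cons (by omega)]
      have hshift : ∀ i ∈ PySem.List.pyRange (s + 1) ((s + 1) + (d.length : Int)) 1,
          PySem.List.pyGetD (a :: d) (i - s) 0 = PySem.List.pyGetD d (i - (s + 1)) 0 := by
        intro i hi
        have hmem := (PySem.List.mem_pyRange_one).mp hi
        have h2 : i - s = (i - (s + 1)) + 1 := by ring
        rw [h2, pyGetD_cons_succ a d _ (by omega)]
      have htail :
          (PySem.List.pyRange (s + 1) ((s + 1) + (d.length : Int)) 1).filter
              (fun i => p (PySem.List.pyGetD (a :: d) (i - s) 0)) =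
          (PySem.List.pyRange (s + 1) ((s + 1) + (d.length : Int)) 1).filter
              (fun i => p (PySem.List.pyGetD d (i - (s + 1)) 0)) :=
        List.filter_congr (fun i hi => by rw [hshift i hi])
      have hmaps :
          ((PySem.List.pyRange (s + 1) ((s + 1) + (d.length : Int)) 1).filter
              (fun i => p (PySem.List.pyGetD (a :: d) (i - s) 0))).map
            (fun i => (i, PySem.List.pyGetD (a :: d) (i - s) 0)) =
          ((PySem.List.pyRange (s + 1) ((s + 1) + (d.length : Int)) 1).filter
              (fun i => p (PySem.List.pyGetD d (i - (s + 1)) 0))).map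
            (fun i => (i, PySem.List.pyGetD d (i - (s + 1)) 0)) := by
        rw [htail]
        exact List.map_congr_left (fun i hi => by
          rw [hshift i (List.mem_of_mem_filter hi)])
      have hhead : PySem.List.pyGetD (a :: d) (s - s) 0 = a := by
        rw [sub_self]; exact PySem.List.pyGetD_zero_cons a d 0
      rw [hcons, PySem.List.enumerate_cons]
      by_cases hp : p a
      · rw [List.filter_cons_of_pos (by simpa using hp),
            List.filter_cons_of_pos (by simpa [hhead] using hp)]
        simp only [List.map_cons, hhead]
        rw [hmaps, ih (s + 1)]
      · rw [List.filter_cons_of_neg (by simpa using hp),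
            List.filter_cons_of_neg (by simpa [hhead] using hp)]
        rw [hmaps, ih (s + 1)]

-- ===== VERDICT (by name: the statement is the Claim_ definition above) =====
theorem get_specs_spec : Claim_equal_get_specs := by
  intro matrix _
  unfold Spec_get_specs get_specs get_specs_alt
  simp only []
  set d := matrix.map (fun x => x.sum) with hd
  rw [sorted_bool_key]
  have hne := filter_enumerate_eq d (fun v => v != 0) 0
  have heq := filter_enumerate_eq d (fun v => v == 0) 0
  simp only [zero_add, sub_zero] at hne heq
  rw [hne, heq]
  simp [List.map_map, Function.comp_def, bne]
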